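-- pv_equiv track=rewrite | github.com/jz-ayp/validar-numero-o23 | validar_numero.py | validar_numero
-- ===== SOURCE A (Python) =====
-- def validar_numero(cadena):
--     "Verifica si la cadena es un número real válido"
--     puntos = 0
--     signos = 0
--     error = False
--     for posicion, caracter in enumerate(cadena):
--         # Sólo dígitos, puntos o signos + o -
--         if not caracter.isdigit():
--             # Sólo un punto
--             if caracter == ".":
--                 puntos += 1
--                 if puntos > 1:
--                     error = True
--                     break
--             # Solo un signo
--             elif caracter in "+-":
--                 signos += 1
--                 if signos > 1:
--                     error = True
--                     break
--                 # Y tiene que ir al principio o al final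
--                 if posicion != 0 and posicion != len(cadena) - 1:
--                     error = True
--                     break
--             else:
--                 # Ningún otro carácter es válido
--                 error = True
--     return not error
-- ===== SOURCE B (Python) =====
-- def validar_numero(cadena):
--     "Verifica si la cadena es un número real válido"
--     if cadena.count('.') > 1:
--         return False
--     signos = [i for i, c in enumerate(cadena) if c in '+-']
--     if len(signos) > 1:
--         return False
--     if any(i != 0 and i != len(cadena) - 1 for i in signos):
--         return False
--     return all(c.isdigit() or c == '.' or c in '+-' for c in cadena)
-- ===== Notes on version B (the rewrite author's own statement) =====
-- stated objective: simpler
-- what changed: Replaced A's single stateful loop (dot/sign counters, error flag, breaks) by independent checks with early returns: dot count, the list of sign indices (count and position), then a per-char validity scan.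
import Mathlib
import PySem

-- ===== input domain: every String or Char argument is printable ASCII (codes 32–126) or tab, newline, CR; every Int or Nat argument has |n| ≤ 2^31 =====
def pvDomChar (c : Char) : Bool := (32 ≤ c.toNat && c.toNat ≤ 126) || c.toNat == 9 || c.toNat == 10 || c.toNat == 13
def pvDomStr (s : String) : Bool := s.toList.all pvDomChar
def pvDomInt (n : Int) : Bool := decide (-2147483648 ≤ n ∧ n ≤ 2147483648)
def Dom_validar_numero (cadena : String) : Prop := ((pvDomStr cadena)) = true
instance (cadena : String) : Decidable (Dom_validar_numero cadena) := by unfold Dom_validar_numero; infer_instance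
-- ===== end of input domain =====

-- B replaces A's single stateful loop (counters + error flag + breaks) by independent
-- targeted checks (dot count, sign index list, per-char validity) with early returns;
-- objective: simpler, same O(n) cost.

-- ===== PORT A =====
-- the for-loop of A: state (posicion, puntos, signos, error); `true`-returns are the breaks
def pvLoopA (n : Int) : List Char → Int → Nat → Nat → Bool → Bool
  | [], _, _, _, error => error
  | caracter :: rest, posicion, puntos, signos, error =>
    if !(PySem.Chars.isdigit caracter) then
      if caracter == '.' then
        if puntos + 1 > 1 then true
        else pvLoopA n rest (posicion + 1) (puntos + 1) signos error
      else if caracter == '+' || caracter == '-' then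
        if signos + 1 > 1 then true
        else if posicion != 0 && posicion != n - 1 then true
        else pvLoopA n rest (posicion + 1) puntos (signos + 1) error
      else pvLoopA n rest (posicion + 1) puntos signos true
    else pvLoopA n rest (posicion + 1) puntos signos error

def validar_numero (cadena : String) : Bool :=
  !(pvLoopA (cadena.toList.length : Int) cadena.toList 0 0 0 false)

-- ===== PORT B =====
def validar_numero_alt (cadena : String) : Bool :=
  let l := cadena.toList
  if PySem.Str.count cadena "." > 1 then false
  else
    let signos := (PySem.List.enumerate l).filterMap
      (fun ic => if ic.2 == '+' || ic.2 == '-' then some ic.1 else none)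
    if signos.length > 1 then false
    else if signos.any (fun i => i != 0 && i != (l.length : Int) - 1) then false
    else l.all (fun c => PySem.Chars.isdigit c || c == '.' || c == '+' || c == '-')

-- ===== PRECONDITION & SPEC =====
def Spec_validar_numero (cadena : String) (out : Bool) : Prop := out = validar_numero_alt cadena
instance (cadena : String) (out : Bool) : Decidable (Spec_validar_numero cadena out) := by unfold Spec_validar_numero; infer_instance

-- ===== CLAIM (what is proved, stated in full; the proofs are below) =====
def Claim_equal_validar_numero : Prop := ∀ (cadena : String), Dom_validar_numero cadena → Spec_validar_numero cadena (validar_numero cadena)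

-- ===== LEMMAS AND PROOFS =====

def pvSgn (c : Char) : Bool := c == '+' || c == '-'
def pvValid (c : Char) : Bool := PySem.Chars.isdigit c || c == '.' || c == '+' || c == '-'

def pvSignOK (n : Int) : List Char → Int → Bool
  | [], _ => true
  | c :: r, pos => (if pvSgn c then (pos == 0 || pos == n - 1) else true) && pvSignOK n r (pos + 1)

def pvNorm (n : Int) (l : List Char) (pos : Int) (pu si : Nat) : Bool :=
  decide (l.count '.' + pu ≤ 1) && decide (l.countP pvSgn + si ≤ 1)
    && pvSignOK n l pos && l.all pvValid

theorem pvLoopA_true (n : Int) (l : List Char) (pos : Int) (pu si : Nat) :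
    pvLoopA n l pos pu si true = true := by
  induction l generalizing pos pu si with
  | nil => rfl
  | cons c r ih =>
    simp only [pvLoopA]
    split_ifs <;> simp [ih]

theorem pvDigit_facts {c : Char} (h : PySem.Chars.isdigit c = true) :
    (c == '.') = false ∧ (c == '+') = false ∧ (c == '-') = false := by
  simp only [PySem.Chars.isdigit, Bool.and_eq_true, decide_eq_true_eq] at h
  obtain ⟨h1, h2⟩ := h
  refine ⟨?_, ?_, ?_⟩ <;> (rw [beq_eq_false_iff_ne]; rintro rfl <;> exact absurd h1 (by decide))

theorem pvLoopA_eq_norm (n : Int) (l : List Char) (pos : Int) (pu si : Nat)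
    (hpu1 : pu ≤ 1) (hsi1 : si ≤ 1) :
    pvLoopA n l pos pu si false = !pvNorm n l pos pu si := by
  induction l generalizing pos pu si with
  | nil => simp [pvLoopA, pvNorm, pvSignOK]; omega
  | cons c r ih =>
    by_cases hd : PySem.Chars.isdigit c = true
    · obtain ⟨h1, h2, h3⟩ := pvDigit_facts hd
      have IH := ih (pos + 1) pu si hpu1 hsi1
      simp [pvLoopA, hd, pvNorm, pvSignOK, pvSgn, pvValid, List.count_cons,
        List.countP_cons, h1, h2, h3, IH]
    · rw [Bool.not_eq_true] at hd
      by_cases hdot : c = '.'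
      · subst hdot
        by_cases hpu : pu + 1 > 1
        · have hx : ¬ (r.count '.' + 1 + pu ≤ 1) := by omega
          simp [pvLoopA, hd, pvNorm, List.count_cons, hpu, hx]
        · have hpu0 : pu = 0 := by omega
          subst hpu0
          have IH := ih (pos + 1) 1 si (by omega) hsi1
          simp [pvLoopA, hd, pvNorm, pvSignOK, pvSgn, pvValid, List.count_cons,
            List.countP_cons, IH]
      · by_cases hsgn : (c == '+' || c == '-') = true
        · by_cases hsi : si + 1 > 1
          · have hx : ¬ (List.countP pvSgn (c :: r) + si ≤ 1) := by
              simp [List.countP_cons, pvSgn, hsgn]; omega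
            simp [pvLoopA, hd, hdot, hsgn, hsi, pvNorm, hx]
          · have hsi0 : si = 0 := by omega
            subst hsi0
            by_cases hpos : (pos != 0 && pos != n - 1) = true
            · have hok : (pos == 0 || pos == n - 1) = false := by
                simp_all
              simp [pvLoopA, hd, hdot, hsgn, hpos, pvNorm, pvSignOK, pvSgn, hok]
            · have hok : (pos == 0 || pos == n - 1) = true := by
                simp only [Bool.and_eq_true, bne_iff_ne, not_and_or, not_not] at hpos
                simp only [Bool.or_eq_true, beq_iff_eq]
                tauto
              have hv : pvValid c = true := by
                simp only [Bool.or_eq_true, beq_iff_eq] at hsgn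
                simp only [pvValid, Bool.or_eq_true, beq_iff_eq]
                tauto
              have IH := ih (pos + 1) pu 1 hpu1 (by omega)
              simp [pvLoopA, hd, hdot, hsgn, hpos, pvNorm, pvSignOK, pvSgn, hok,
                List.count_cons, List.countP_cons, hv, IH]
        · have h34 : c ≠ '+' ∧ c ≠ '-' := by
            simpa [not_or] using hsgn
          have hv : pvValid c = false := by
            simp [pvValid, hd, hdot, h34.1, h34.2]
          simp [pvLoopA, hd, hdot, hsgn, pvLoopA_true, pvNorm, hv]

theorem pvCount_go_dot (l : List Char) (fuel acc : Nat) (h : l.length ≤ fuel) :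
    PySem.Chars.count.go ['.'] fuel l acc = acc + l.count '.' := by
  induction l generalizing fuel acc with
  | nil => cases fuel <;> simp [PySem.Chars.count.go]
  | cons c r ih =>
    cases fuel with
    | zero => simp at h
    | succ f =>
      simp only [List.length_cons, Nat.succ_le_succ_iff] at h
      rw [show PySem.Chars.count.go ['.'] (f + 1) (c :: r) acc =
        if List.isPrefixOf ['.'] (c :: r) then
          PySem.Chars.count.go ['.'] f (List.drop (List.length ['.']) (c :: r)) (acc + 1)
        else PySem.Chars.count.go ['.'] f r acc from rfl]
      by_cases hc : c = '.'
      · subst hc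
        have hp : List.isPrefixOf ['.'] ('.' :: r) = true := by
          simp [List.isPrefixOf]
        rw [if_pos hp]
        simp only [List.length_singleton, List.drop_succ_cons, List.drop_zero]
        rw [ih f (acc + 1) h, List.count_cons]
        simp; omega
      · have hp : List.isPrefixOf ['.'] (c :: r) = false := by
          simp only [List.isPrefixOf, List.isPrefixOf_nil_left, Bool.and_true,
            beq_eq_false_iff_ne]
          exact fun e => hc e.symm
        rw [if_neg (by simp [hp]), ih f acc h, List.count_cons]
        simp [hc]

theorem pvCount_dot (l : List Char) : PySem.Chars.count l ['.'] = l.count '.' := by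
  simp [PySem.Chars.count, pvCount_go_dot l l.length 0 (le_refl _)]

def pvSignos (l : List Char) (s : Int) : List Int :=
  (PySem.List.enumerate l s).filterMap
    (fun ic => if ic.2 == '+' || ic.2 == '-' then some ic.1 else none)

theorem pvSignos_cons (c : Char) (r : List Char) (s : Int) :
    pvSignos (c :: r) s =
      if (c == '+' || c == '-') then s :: pvSignos r (s + 1) else pvSignos r (s + 1) := by
  rw [show pvSignos (c :: r) s =
    (List.filterMap (fun ic => if ic.2 == '+' || ic.2 == '-' then some ic.1 else none)
      (PySem.List.enumerate (c :: r) s)) from rfl]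
  rw [PySem.List.enumerate_cons, List.filterMap_cons]
  by_cases h : (c == '+' || c == '-') = true <;> simp only [h] <;> rfl

theorem pvSignos_length (l : List Char) (s : Int) :
    (pvSignos l s).length = l.countP pvSgn := by
  induction l generalizing s with
  | nil => rfl
  | cons c r ih =>
    rw [pvSignos_cons, List.countP_cons]
    by_cases h : (c == '+' || c == '-') = true
    · simp [h, pvSgn, ih]
    · simp only [Bool.not_eq_true] at h
      simp [h, pvSgn, ih]

theorem pvSignos_any (n : Int) (l : List Char) (s : Int) :
    (pvSignos l s).any (fun i => i != 0 && i != n - 1) = !pvSignOK n l s := by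
  induction l generalizing s with
  | nil => rfl
  | cons c r ih =>
    rw [pvSignos_cons]
    simp only [pvSignOK, pvSgn]
    by_cases h : (c == '+' || c == '-') = true
    · simp only [h, if_pos, List.any_cons, ih]
      cases hok : (s == 0 || s == n - 1) <;> simp_all <;> tauto
    · simp only [Bool.not_eq_true] at h
      simp [h, ih]

theorem pvAlt_eq_norm (cadena : String) :
    validar_numero_alt cadena =
      pvNorm (cadena.toList.length : Int) cadena.toList 0 0 0 := by
  unfold validar_numero_alt pvNorm
  have hc : PySem.Str.count cadena "." = cadena.toList.count '.' := by
    rw [PySem.Str.count_eq]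
    exact pvCount_dot _
  rw [hc]
  by_cases h1 : cadena.toList.count '.' > 1
  · simp [h1]
  · simp only [h1, if_false]
    rw [show ((PySem.List.enumerate cadena.toList).filterMap
      (fun ic => if ic.2 == '+' || ic.2 == '-' then some ic.1 else none)) =
        pvSignos cadena.toList 0 from rfl]
    rw [pvSignos_length, pvSignos_any]
    by_cases h2 : cadena.toList.countP pvSgn > 1
    · simp [h2]
    · simp only [h2, if_false]
      have e1 : decide (cadena.toList.count '.' ≤ 1) = true := by simp; omega
      have e2 : decide (cadena.toList.countP pvSgn ≤ 1) = true := by simp; omega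
      cases hs : pvSignOK (cadena.toList.length : Int) cadena.toList 0
      · simp [hs]
      · simp [hs, e1, e2]
        rfl

-- ===== VERDICT (by name: the statement is the Claim_ definition above) =====
theorem validar_numero_spec : Claim_equal_validar_numero := by
  intro cadena _
  unfold Spec_validar_numero validar_numero
  rw [pvLoopA_eq_norm _ _ _ _ _ (by omega) (by omega), pvAlt_eq_norm, Bool.not_not]
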